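-- pv_equiv track=rewrite | github.com/banma1234/killthePython | 11/11-2(pbs).py | disassamble
-- ===== SOURCE A (Python) =====
-- def disassamble(n):
--     num=n
--     res=0
--     while num>=1:
--         res+=num%10
--         num//=10
--     res+=n
--     return res
-- ===== SOURCE B (Python) =====
-- def disassamble(n):
--     if n < 1:
--         return n
--     return n + sum(int(d) for d in str(n))
-- ===== Notes on version B (the rewrite author's own statement) =====
-- stated objective: idiomatic
-- what changed: B computes the digit sum by iterating over the characters of str(n) instead of A's explicit mod/floordiv loop, returning early for zero and negative inputs where A's loop body never runs.
import Mathlib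
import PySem

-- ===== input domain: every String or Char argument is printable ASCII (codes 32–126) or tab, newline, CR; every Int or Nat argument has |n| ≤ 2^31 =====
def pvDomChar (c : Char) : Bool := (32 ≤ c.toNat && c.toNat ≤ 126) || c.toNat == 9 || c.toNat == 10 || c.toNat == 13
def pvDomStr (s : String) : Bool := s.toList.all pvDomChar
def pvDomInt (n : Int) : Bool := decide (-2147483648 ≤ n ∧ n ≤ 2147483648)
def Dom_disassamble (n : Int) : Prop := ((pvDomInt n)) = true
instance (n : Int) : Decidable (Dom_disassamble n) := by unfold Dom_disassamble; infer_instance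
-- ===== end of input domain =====

-- B computes the digit sum from the characters of str(n) instead of A's mod/floordiv loop; same result, idiomatic restatement.


-- ===== PORT A =====
-- the while loop of A: state (num, res); one step per iteration, Python '%' / '//' via PySem
def disassambleLoop (num res : Int) : Int :=
  if 1 ≤ num then
    disassambleLoop (PySem.Int.floordiv num 10) (res + PySem.Int.mod num 10)
  else res
termination_by num.toNat
decreasing_by
  have : PySem.Int.floordiv num 10 = num / 10 := by
    unfold PySem.Int.floordiv
    exact Int.fdiv_eq_ediv_of_nonneg _ (by norm_num)
  simp only [this]
  omega

def disassamble (n : Int) : Int :=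
  disassambleLoop n 0 + n

-- ===== PORT B =====
def disassamble_alt (n : Int) : Int :=
  if n < 1 then n
  else n + ((PySem.Int.toStr n).toList.map
              (fun d => (PySem.Int.ofChars? [d]).getD 0)).sum

-- ===== PRECONDITION & SPEC =====
def Spec_disassamble (n : Int) (out : Int) : Prop := out = disassamble_alt n
instance (n : Int) (out : Int) : Decidable (Spec_disassamble n out) := by unfold Spec_disassamble; infer_instance

-- ===== CLAIM (what is proved, stated in full; the proofs are below) =====
def Claim_equal_disassamble : Prop := ∀ (n : Int), Dom_disassamble n → Spec_disassamble n (disassamble n)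

-- ===== LEMMAS AND PROOFS =====

-- mathematical digit sum, the common reference of both ports
def dsum (n : Nat) : Nat :=
  if n = 0 then 0 else n % 10 + dsum (n / 10)
decreasing_by omega

lemma digitChar_val {r : Nat} (h : r < 10) :
    (PySem.Int.ofChars? [Nat.digitChar r]).getD 0 = (r : Int) := by
  interval_cases r <;> decide

lemma sumB_toDigitsCore : ∀ (fuel n : Nat) (ds : List Char), n < fuel →
    ((Nat.toDigitsCore 10 fuel n ds).map (fun d => (PySem.Int.ofChars? [d]).getD 0)).sum
      = (dsum n : Int)
        + (ds.map (fun d => (PySem.Int.ofChars? [d]).getD 0)).sum := by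
  intro fuel
  induction fuel with
  | zero => intro n ds h; omega
  | succ f ih =>
    intro n ds h
    rw [Nat.toDigitsCore]
    by_cases h0 : n / 10 = 0
    · simp only [h0, if_true, List.map_cons, List.sum_cons]
      rw [digitChar_val (Nat.mod_lt _ (by norm_num))]
      rw [dsum]
      by_cases hn : n = 0
      · subst hn; simp
      · rw [if_neg hn, h0, dsum]
        push_cast
        ring
    · rw [if_neg h0]
      rw [ih (n / 10) _ (by omega)]
      simp only [List.map_cons, List.sum_cons]
      rw [digitChar_val (Nat.mod_lt _ (by norm_num))]
      conv_rhs => rw [dsum]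
      rw [if_neg (by omega)]
      push_cast
      ring

lemma loopA_eq : ∀ (m : Nat) (res : Int),
    disassambleLoop (m : Int) res = res + (dsum m : Int) := by
  intro m
  induction m using Nat.strong_induction_on with
  | _ m ih =>
    intro res
    rw [disassambleLoop]
    by_cases hm : 1 ≤ (m : Int)
    · rw [if_pos hm]
      have hm1 : 1 ≤ m := by exact_mod_cast hm
      have hfd : PySem.Int.floordiv (m : Int) 10 = ((m / 10 : Nat) : Int) := by
        unfold PySem.Int.floordiv
        rw [Int.fdiv_eq_ediv_of_nonneg _ (by norm_num)]
        omega
      have hfm : PySem.Int.mod (m : Int) 10 = ((m % 10 : Nat) : Int) := by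
        unfold PySem.Int.mod
        rw [Int.fmod_eq_emod]
        simp only [show ((0:Int) ≤ 10 ∨ (10:Int) ∣ (m:Int)) from Or.inl (by norm_num), if_pos]
        omega
      rw [hfd, hfm, ih (m / 10) (by omega)]
      conv_rhs => rw [dsum]
      rw [if_neg (by omega)]
      push_cast
      ring
    · rw [if_neg hm]
      have : m = 0 := by omega
      subst this
      simp [dsum]

lemma disassamble_eq_alt (n : Int) : disassamble n = disassamble_alt n := by
  unfold disassamble disassamble_alt
  by_cases h : n < 1
  · rw [if_pos h, disassambleLoop, if_neg (by omega)]
    ring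
  · rw [if_neg h]
    have hn : (0:Int) ≤ n := by omega
    have hcast : n = ((n.toNat : Nat) : Int) := by omega
    rw [PySem.Int.toList_toStr]
    unfold PySem.Int.toChars
    rw [if_neg (by omega)]
    unfold Nat.toDigits
    rw [sumB_toDigitsCore (n.toNat + 1) n.toNat [] (by omega)]
    conv_lhs => rw [hcast]
    rw [loopA_eq]
    simp
    omega

-- ===== VERDICT (by name: the statement is the Claim_ definition above) =====
theorem disassamble_spec : Claim_equal_disassamble := by
  intro n _
  exact disassamble_eq_alt n
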